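-- pv_equiv track=rewrite | github.com/Erasable-Mak/bot-gpt-backend | app/services/llm_service.py | simulate_rag_retrieval
-- ===== SOURCE A (Python) =====
-- from typing import List, Dict, Any, Tuple
--
-- def simulate_rag_retrieval(query: str, document_ids: List[str]) -> str:
--     """
--     Simulate RAG retrieval for the case study.
--     In a real implementation, this would query a vector database.
--     For now, we'll return hardcoded context based on query.
--     """
--     # keyword based simulation
--     query_lower = query.lower()
--
--     if any(word in query_lower for word in ['python', 'code', 'programming']):
--         return """Python is a high-level, interpreted programming language known for its readability and versatility.
--         It supports multiple programming paradigms including procedural, object-oriented, and functional programming.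
--         Python's syntax emphasizes readability with its use of significant indentation."""
--
--     elif any(word in query_lower for word in ['machine learning', 'ml', 'ai', 'model']):
--         return """Machine learning is a subset of artificial intelligence that focuses on building systems that learn from data.
--         It involves algorithms that improve automatically through experience. Common types include supervised learning,
--         unsupervised learning, and reinforcement learning."""
--
--     elif any(word in query_lower for word in ['database', 'sql', 'query']):
--         return """A database is an organized collection of data stored and accessed electronically.
--         SQL (Structured Query Language) is a standard language for managing and querying relational databases.
--         Common database systems include PostgreSQL, MySQL, SQLite, and MongoDB."""
--
--     else:
--         return """This is a general context for the conversation. The system is designed to provide helpful and accurate information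
--         based on retrieved documents. In a real implementation, this context would come from relevant document chunks
--         retrieved using vector similarity search."""
-- ===== SOURCE B (Python) =====
-- _RESPONSES = [
--     """Python is a high-level, interpreted programming language known for its readability and versatility.
--         It supports multiple programming paradigms including procedural, object-oriented, and functional programming.
--         Python's syntax emphasizes readability with its use of significant indentation.""",
--     """Machine learning is a subset of artificial intelligence that focuses on building systems that learn from data.
--         It involves algorithms that improve automatically through experience. Common types include supervised learning,
--         unsupervised learning, and reinforcement learning.""",
--     """A database is an organized collection of data stored and accessed electronically.
--         SQL (Structured Query Language) is a standard language for managing and querying relational databases.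
--         Common database systems include PostgreSQL, MySQL, SQLite, and MongoDB.""",
--     """This is a general context for the conversation. The system is designed to provide helpful and accurate information
--         based on retrieved documents. In a real implementation, this context would come from relevant document chunks
--         retrieved using vector similarity search.""",
-- ]
--
-- # flat keyword -> priority (index into _RESPONSES); 3 = default
-- _PRIORITY = {
--     'python': 0, 'code': 0, 'programming': 0,
--     'machine learning': 1, 'ml': 1, 'ai': 1, 'model': 1,
--     'database': 2, 'sql': 2, 'query': 2,
-- }
--
-- def simulate_rag_retrieval(query, document_ids):
--     ql = query.lower()
--     best = min((p for k, p in _PRIORITY.items() if k in ql), default=3)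
--     return _RESPONSES[best]
-- ===== Notes on version B (the rewrite author's own statement) =====
-- stated objective: alternative
-- what changed: Replaces the if/elif early-return dispatch by exhaustive scoring: a flat keyword-to-priority map, minimum priority over all matching keywords (default 3), and a single index into a response list.
import Mathlib
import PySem

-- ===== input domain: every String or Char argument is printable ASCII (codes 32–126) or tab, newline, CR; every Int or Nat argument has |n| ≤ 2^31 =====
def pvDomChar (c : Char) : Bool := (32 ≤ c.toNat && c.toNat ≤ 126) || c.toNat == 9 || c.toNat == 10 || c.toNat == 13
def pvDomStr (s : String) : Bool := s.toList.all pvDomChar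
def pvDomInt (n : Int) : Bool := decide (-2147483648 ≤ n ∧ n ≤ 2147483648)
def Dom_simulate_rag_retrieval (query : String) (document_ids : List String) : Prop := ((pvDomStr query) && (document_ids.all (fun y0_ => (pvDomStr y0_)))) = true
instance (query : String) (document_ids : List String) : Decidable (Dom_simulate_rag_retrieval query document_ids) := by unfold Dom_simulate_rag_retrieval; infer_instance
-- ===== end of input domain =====

-- B replaces A's if/elif dispatch by exhaustive scoring: a flat keyword→priority map, min priority over all matching keywords, index into a response list; objective: alternative.

-- ===== PORT A =====
def pvRespPython : String := "Python is a high-level, interpreted programming language known for its readability and versatility. \n        It supports multiple programming paradigms including procedural, object-oriented, and functional programming. \n        Python's syntax emphasizes readability with its use of significant indentation."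
def pvRespML : String := "Machine learning is a subset of artificial intelligence that focuses on building systems that learn from data. \n        It involves algorithms that improve automatically through experience. Common types include supervised learning, \n        unsupervised learning, and reinforcement learning."
def pvRespDB : String := "A database is an organized collection of data stored and accessed electronically. \n        SQL (Structured Query Language) is a standard language for managing and querying relational databases. \n        Common database systems include PostgreSQL, MySQL, SQLite, and MongoDB."
def pvRespDefault : String := "This is a general context for the conversation. The system is designed to provide helpful and accurate information \n        based on retrieved documents. In a real implementation, this context would come from relevant document chunks \n        retrieved using vector similarity search."

def simulate_rag_retrieval (query : String) (document_ids : List String) : String :=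
  let query_lower := PySem.Str.lower query
  if ["python", "code", "programming"].any (fun word => PySem.Str.isIn word query_lower) then
    pvRespPython
  else if ["machine learning", "ml", "ai", "model"].any (fun word => PySem.Str.isIn word query_lower) then
    pvRespML
  else if ["database", "sql", "query"].any (fun word => PySem.Str.isIn word query_lower) then
    pvRespDB
  else
    pvRespDefault

-- ===== PORT B =====
def pvResponses : List String := [pvRespPython, pvRespML, pvRespDB, pvRespDefault]

-- the _PRIORITY dict of Source B: keyword → response index
def pvPriority : List (String × Nat) :=
  [("python", 0), ("code", 0), ("programming", 0),
   ("machine learning", 1), ("ml", 1), ("ai", 1), ("model", 1),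
   ("database", 2), ("sql", 2), ("query", 2)]

def simulate_rag_retrieval_alt (query : String) (document_ids : List String) : String :=
  let ql := PySem.Str.lower query
  let best := ((pvPriority.filter (fun kp => PySem.Str.isIn kp.1 ql)).map Prod.snd).foldl min 3
  pvResponses.getD best pvRespDefault

-- ===== PRECONDITION & SPEC =====
def Spec_simulate_rag_retrieval (query : String) (document_ids : List String) (out : String) : Prop := out = simulate_rag_retrieval_alt query document_ids
instance (query : String) (document_ids : List String) (out : String) : Decidable (Spec_simulate_rag_retrieval query document_ids out) := by unfold Spec_simulate_rag_retrieval; infer_instance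

-- ===== CLAIM (what is proved, stated in full; the proofs are below) =====
def Claim_equal_simulate_rag_retrieval : Prop := ∀ (query : String) (document_ids : List String), Dom_simulate_rag_retrieval query document_ids → Spec_simulate_rag_retrieval query document_ids (simulate_rag_retrieval query document_ids)

-- ===== LEMMAS AND PROOFS =====

-- ===== VERDICT (by name: the statement is the Claim_ definition above) =====
set_option maxRecDepth 8192 in
theorem simulate_rag_retrieval_spec : Claim_equal_simulate_rag_retrieval := by
  intro query document_ids _
  unfold Spec_simulate_rag_retrieval simulate_rag_retrieval simulate_rag_retrieval_alt pvPriority pvResponses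
  simp only [List.filter_cons, List.filter_nil, List.any_cons, List.any_nil, Bool.or_false]
  generalize PySem.Str.isIn "python" (PySem.Str.lower query) = b1
  generalize PySem.Str.isIn "code" (PySem.Str.lower query) = b2
  generalize PySem.Str.isIn "programming" (PySem.Str.lower query) = b3
  generalize PySem.Str.isIn "machine learning" (PySem.Str.lower query) = b4
  generalize PySem.Str.isIn "ml" (PySem.Str.lower query) = b5
  generalize PySem.Str.isIn "ai" (PySem.Str.lower query) = b6
  generalize PySem.Str.isIn "model" (PySem.Str.lower query) = b7
  generalize PySem.Str.isIn "database" (PySem.Str.lower query) = b8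
  generalize PySem.Str.isIn "sql" (PySem.Str.lower query) = b9
  generalize PySem.Str.isIn "query" (PySem.Str.lower query) = b10
  revert b1 b2 b3 b4 b5 b6 b7 b8 b9 b10
  decide
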